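-- pv_equiv track=rewrite | github.com/murmour/icfpc-2024-wbm | python/rle.py | encode_block
-- ===== SOURCE A (Python) =====
-- CHAR_MAP = {
--     "U": 0b00,
--     "R": 0b01,
--     "D": 0b10,
--     "L": 0b11,
-- }
--
-- def encode_block(s: str, count_size: int = 2, char_size: int = 2) -> int:
--     if char_size < 1:
--         raise ValueError("char_size must be greater than or equal to 1")
--
--     if count_size < 1:
--         raise ValueError("count_size must be greater than or equal to 1")
--
--     block_size = count_size + char_size
--     max_n = (1 << count_size) - 1
--
--     last_c = s[0]
--     last_n = 1
--     res = 0
--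
--     for c in s[1:]:
--         if c == last_c and last_n < max_n:
--             last_n += 1
--         else:
--             last_n <<= char_size
--             last_n += CHAR_MAP[last_c]
--
--             res <<= block_size
--             res += last_n
--
--             last_c = c
--             last_n = 1
--
--     last_n <<= char_size
--     last_n += CHAR_MAP[last_c]
--
--     res <<= block_size
--     res += last_n
--
--     return res
-- ===== SOURCE B (Python) =====
-- CHAR_MAP = {
--     "U": 0b00,
--     "R": 0b01,
--     "D": 0b10,
--     "L": 0b11,
-- }
--
-- def encode_block(s: str, count_size: int = 2, char_size: int = 2) -> int:
--     if char_size < 1: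
--         raise ValueError("char_size must be greater than or equal to 1")
--     if count_size < 1:
--         raise ValueError("count_size must be greater than or equal to 1")
--
--     block_size = count_size + char_size
--     max_n = (1 << count_size) - 1
--
--     # pass 1: split s into capped runs [(char, count)], count <= max_n
--     runs = []
--     cur_c = s[0]
--     cur_n = 1
--     for c in s[1:]:
--         if c == cur_c and cur_n < max_n:
--             cur_n += 1
--         else:
--             runs.append((cur_c, cur_n))
--             cur_c = c
--             cur_n = 1
--     runs.append((cur_c, cur_n))
--
--     # pass 2: pack the runs
--     res = 0
--     for c, n in runs:
--         res = (res << block_size) + (n << char_size) + CHAR_MAP[c]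
--     return res
-- ===== Notes on version B (the rewrite author's own statement) =====
-- stated objective: alternative
-- what changed: B separates run-length grouping from bit-packing: a first pass builds a list of capped (char,count) runs, a second pass folds them into the packed integer, instead of A's single loop that interleaves counting with shifting.
import Mathlib
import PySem

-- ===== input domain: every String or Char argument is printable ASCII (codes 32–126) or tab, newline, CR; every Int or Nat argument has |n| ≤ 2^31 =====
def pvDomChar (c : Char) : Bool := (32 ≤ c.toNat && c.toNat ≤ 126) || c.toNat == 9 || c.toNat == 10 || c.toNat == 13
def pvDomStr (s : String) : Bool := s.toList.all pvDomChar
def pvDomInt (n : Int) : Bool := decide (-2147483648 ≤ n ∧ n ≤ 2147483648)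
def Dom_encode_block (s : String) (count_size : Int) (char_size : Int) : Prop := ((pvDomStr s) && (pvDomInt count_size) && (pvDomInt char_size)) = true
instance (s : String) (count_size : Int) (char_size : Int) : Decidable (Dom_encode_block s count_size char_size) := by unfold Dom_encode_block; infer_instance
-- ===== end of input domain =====

-- ===== PORT A =====
-- B changes the decomposition: two passes (build capped runs, then pack) instead of A's single interleaved loop; no speed claim.

-- CHAR_MAP lookup; Python raises KeyError outside "URDL" (excluded by Pre_), here default 0
def pvCharMap (c : Char) : Int :=
  if c = 'U' then 0 else if c = 'R' then 1 else if c = 'D' then 2 else if c = 'L' then 3 else 0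

-- literal transliteration of A: one fold over s[1:] carrying (last_c, last_n, res)
def encode_block (s : String) (count_size : Int) (char_size : Int) : Int :=
  let block_size := count_size + char_size
  let max_n : Int := 2 ^ count_size.toNat - 1
  match s.toList with
  | [] => 0   -- Python raises IndexError on s[0]; excluded by Pre_
  | c0 :: rest =>
    let st := rest.foldl (fun (st : Char × Int × Int) c =>
      if c = st.1 ∧ st.2.1 < max_n then (st.1, st.2.1 + 1, st.2.2)
      else (c, 1, st.2.2 * 2 ^ block_size.toNat + (st.2.1 * 2 ^ char_size.toNat + pvCharMap st.1)))
      (c0, 1, 0)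
    st.2.2 * 2 ^ block_size.toNat + (st.2.1 * 2 ^ char_size.toNat + pvCharMap st.1)

-- ===== PORT B =====
-- pass 1: split the characters into capped runs, carrying the open run (c, n)
def pvRuns (max_n : Int) : List Char → Char → Int → List (Char × Int)
  | [], c, n => [(c, n)]
  | x :: xs, c, n =>
    if x = c ∧ n < max_n then pvRuns max_n xs c (n + 1)
    else (c, n) :: pvRuns max_n xs x 1

def encode_block_alt (s : String) (count_size : Int) (char_size : Int) : Int :=
  let block_size := count_size + char_size
  let max_n : Int := 2 ^ count_size.toNat - 1
  match s.toList with
  | [] => 0   -- Python raises IndexError on s[0]; excluded by Pre_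
  | c0 :: rest =>
    -- pass 2: pack the runs
    (pvRuns max_n rest c0 1).foldl
      (fun res cn => res * 2 ^ block_size.toNat + (cn.2 * 2 ^ char_size.toNat + pvCharMap cn.1)) 0

-- ===== PRECONDITION & SPEC =====
-- Pre_ excludes exactly the inputs where Python A raises: ValueError when count_size or
-- char_size < 1, IndexError on the empty string, KeyError on characters outside "URDL".
def Pre_encode_block (s : String) (count_size : Int) (char_size : Int) : Prop :=
  1 ≤ count_size ∧ 1 ≤ char_size ∧ s.toList ≠ [] ∧
  (s.toList.all (fun c => c = 'U' ∨ c = 'R' ∨ c = 'D' ∨ c = 'L')) = true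
instance (s : String) (count_size : Int) (char_size : Int) : Decidable (Pre_encode_block s count_size char_size) := by unfold Pre_encode_block; infer_instance
def pvWitness_encode_block : String × Int × Int := ("UUURDL", 2, 2)
def Spec_encode_block (s : String) (count_size : Int) (char_size : Int) (out : Int) : Prop := out = encode_block_alt s count_size char_size
instance (s : String) (count_size : Int) (char_size : Int) (out : Int) : Decidable (Spec_encode_block s count_size char_size out) := by unfold Spec_encode_block; infer_instance

-- ===== CLAIM (what is proved, stated in full; the proofs are below) =====
def Claim_equal_encode_block : Prop := ∀ (s : String) (count_size : Int) (char_size : Int), Dom_encode_block s count_size char_size → Pre_encode_block s count_size char_size → Spec_encode_block s count_size char_size (encode_block s count_size char_size)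

-- ===== LEMMAS AND PROOFS =====

-- A's fold from state (c, n, res) computes the pack-fold of the runs of the remaining input
theorem encode_loop_eq_runs (max_n bs cs : Int) :
    ∀ (xs : List Char) (c : Char) (n res : Int),
      (let st := xs.foldl (fun (st : Char × Int × Int) x =>
          if x = st.1 ∧ st.2.1 < max_n then (st.1, st.2.1 + 1, st.2.2)
          else (x, 1, st.2.2 * 2 ^ bs.toNat + (st.2.1 * 2 ^ cs.toNat + pvCharMap st.1)))
        (c, n, res)
       st.2.2 * 2 ^ bs.toNat + (st.2.1 * 2 ^ cs.toNat + pvCharMap st.1))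
      = (pvRuns max_n xs c n).foldl
          (fun res cn => res * 2 ^ bs.toNat + (cn.2 * 2 ^ cs.toNat + pvCharMap cn.1)) res := by
  intro xs
  induction xs with
  | nil => intro c n res; simp [pvRuns]
  | cons x xs ih =>
    intro c n res
    by_cases h : x = c ∧ n < max_n
    · simp only [pvRuns, List.foldl_cons, if_pos h]
      exact ih c (n + 1) res
    · simp only [pvRuns, List.foldl_cons, if_neg h]
      exact ih x 1 _

-- ===== VERDICT (by name: the statement is the Claim_ definition above) =====
theorem encode_block_spec : Claim_equal_encode_block := by
  intro s count_size char_size _ _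
  unfold Spec_encode_block encode_block encode_block_alt
  cases s.toList with
  | nil => rfl
  | cons c0 rest =>
    simpa using encode_loop_eq_runs (2 ^ count_size.toNat - 1) (count_size + char_size) char_size rest c0 1 0
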